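-- pv_equiv track=rewrite | github.com/cassia-oss/Exercisum-s_notes_and_practices | solutions/python/inventory-management/1/dicts.py | add_items
-- ===== SOURCE A (Python) =====
-- def create_inventory(items):
--     """Create a dict that tracks the amount (count) of each element on the `items` list.
--
--     :param items: list - list of items to create an inventory from.
--     :return: dict - the inventory dictionary.
--     """
--     count = dict()
--     for item in items:
--         if item in count:
--             count[item] += 1
--         else:
--             count[item] = 1
--     return count
--     pass
--
-- def add_items(inventory, items):
--     """Add or increment items in inventory using elements from the items `list`.
--
--     :param inventory: dict - dictionary of existing inventory.
--     :param items: list - list of items to update the inventory with.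
--     :return: dict - the inventory updated with the new items.
--     """
--     new_item_count = create_inventory(items)
--     for key in new_item_count:
--         if key not in inventory:
--             inventory[key] = new_item_count[key]
--         else:
--             inventory[key] += new_item_count[key]
--     return inventory
--     pass
-- ===== SOURCE B (Python) =====
-- def add_items(inventory, items):
--     """Add or increment items in inventory using elements from the items `list`.
--
--     Single direct pass: increments inventory in place, no intermediate count dict.
--     """
--     for item in items:
--         inventory[item] = inventory.get(item, 0) + 1
--     return inventory
-- ===== Notes on version B (the rewrite author's own statement) =====
-- stated objective: simpler
-- what changed: Replaces A's two-pass build-a-count-dict-then-merge structure with a single direct pass that increments inventory in place via inventory.get(item, 0) + 1.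
import Mathlib
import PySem

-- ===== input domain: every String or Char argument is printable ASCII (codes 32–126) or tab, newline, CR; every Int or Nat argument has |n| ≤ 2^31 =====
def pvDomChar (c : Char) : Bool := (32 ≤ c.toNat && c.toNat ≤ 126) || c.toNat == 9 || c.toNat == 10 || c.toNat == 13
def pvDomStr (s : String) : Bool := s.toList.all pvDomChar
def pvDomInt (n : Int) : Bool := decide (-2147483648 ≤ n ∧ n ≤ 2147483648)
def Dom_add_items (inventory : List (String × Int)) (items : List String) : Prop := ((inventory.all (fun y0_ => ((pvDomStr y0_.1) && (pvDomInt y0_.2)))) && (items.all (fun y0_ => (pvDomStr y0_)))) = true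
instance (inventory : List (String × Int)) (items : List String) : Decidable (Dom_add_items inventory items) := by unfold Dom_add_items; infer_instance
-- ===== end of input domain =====

-- B replaces A's two-pass "build a count dict, then merge it into inventory" with one
-- direct accumulation pass over items (simpler; same asymptotic cost). A mutates the
-- inventory dict in place and returns it; B performs the same mutation — the theorems
-- here are about the returned value.

-- ===== PORT A =====
def add_items (inventory : List (String × Int)) (items : List String) : List (String × Int) :=
  -- create_inventory(items): for item in items: if item in count: count[item] += 1 else: count[item] = 1
  let count : PySem.Dict String Int :=
    items.foldl (fun d item => if d.contains item then d.modify item 0 (· + 1) else d.insert item 1)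
      PySem.Dict.empty
  -- for key in new_item_count: if key not in inventory: inventory[key] = …[key] else: inventory[key] += …[key]
  (count.keys.foldl
    (fun d key => if d.contains key then d.modify key 0 (· + count.getD key 0)
                  else d.insert key (count.getD key 0))
    (PySem.Dict.mk inventory)).items

-- ===== PORT B =====
def add_items_alt (inventory : List (String × Int)) (items : List String) : List (String × Int) :=
  -- for item in items: inventory[item] = inventory.get(item, 0) + 1
  (items.foldl (fun d item => d.insert item (d.getD item 0 + 1)) (PySem.Dict.mk inventory)).items

-- ===== PRECONDITION & SPEC =====
-- The association list stands for a Python dict, whose keys are necessarily distinct;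
-- Pre_ only states that shape (it excludes no input a Python caller can supply).
def Pre_add_items (inventory : List (String × Int)) (items : List String) : Prop :=
  (inventory.map Prod.fst).Nodup
instance (inventory : List (String × Int)) (items : List String) : Decidable (Pre_add_items inventory items) := by unfold Pre_add_items; infer_instance

def pvWitness_add_items : (List (String × Int)) × List String :=
  ([("apple", 2), ("pear", 1)], ["banana", "apple", "banana"])

def Spec_add_items (inventory : List (String × Int)) (items : List String) (out : List (String × Int)) : Prop := out = add_items_alt inventory items
instance (inventory : List (String × Int)) (items : List String) (out : List (String × Int)) : Decidable (Spec_add_items inventory items out) := by unfold Spec_add_items; infer_instance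

-- ===== CLAIM (what is proved, stated in full; the proofs are below) =====
def Claim_equal_add_items : Prop := ∀ (inventory : List (String × Int)) (items : List String), Dom_add_items inventory items → Pre_add_items inventory items → Spec_add_items inventory items (add_items inventory items)

-- ===== LEMMAS AND PROOFS =====

-- A's counting branch is exactly d.modify item 0 (· + 1), so create_inventory is Counter(items).
theorem count_fold_eq_counter (items : List String) :
    items.foldl (fun d item => if d.contains item then d.modify item 0 (· + 1) else d.insert item 1)
      PySem.Dict.empty = PySem.Dict.counter items := by
  rw [PySem.Dict.counter_eq_foldl]
  congr 1
  funext d item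
  by_cases h : d.contains item = true
  · simp [h]
  · simp only [Bool.not_eq_true] at h
    simp [h, PySem.Dict.modify, PySem.Dict.getD_of_not_contains _ _ h]

-- A's merge branch is exactly d.modify key 0 (· + f key).
theorem merge_fold_eq_modify (l : List String) (f : String → Int) (d : PySem.Dict String Int) :
    l.foldl (fun d key => if d.contains key then d.modify key 0 (· + f key)
                          else d.insert key (f key)) d
      = l.foldl (fun d key => d.modify key 0 (· + f key)) d := by
  congr 1
  funext d key
  by_cases h : d.contains key = true
  · simp [h]
  · simp only [Bool.not_eq_true] at h
    simp [h, PySem.Dict.modify, PySem.Dict.getD_of_not_contains _ _ h]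

theorem getD_merge_fold (l : List String) (f : String → Int) (d : PySem.Dict String Int) (v : String) :
    (l.foldl (fun d key => d.modify key 0 (· + f key)) d).getD v 0
      = d.getD v 0 + (l.count v : Int) * f v := by
  induction l generalizing d with
  | nil => simp
  | cons x xs ih =>
    simp only [List.foldl_cons, ih, PySem.Dict.getD_modify, List.count_cons]
    by_cases hv : v = x
    · subst hv; simp; ring
    · simp [hv, Ne.symm hv]

theorem update_ofList (s : PySem.Set String) (l : List String) :
    PySem.Set.update s (PySem.Set.ofList l) = PySem.Set.update s l := by
  rw [PySem.Set.update_eq_append_filter, PySem.Set.update_eq_append_filter,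
    PySem.Set.ofList_ofList]

-- ===== VERDICT (by name: the statement is the Claim_ definition above) =====
theorem add_items_spec : Claim_equal_add_items := by
  intro inventory items _ hpre
  unfold Spec_add_items add_items add_items_alt
  simp only []
  rw [count_fold_eq_counter, merge_fold_eq_modify]
  have hK : (PySem.Dict.mk inventory).keys.Nodup := by
    simpa [PySem.Dict.keys] using hpre
  -- keys of both results
  have hkeysA : (List.foldl (fun d key => d.modify key 0 (· + (PySem.Dict.counter items).getD key 0))
      (PySem.Dict.mk inventory) (PySem.Dict.counter items).keys).keys
      = PySem.Set.update (PySem.Dict.mk inventory).keys items := by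
    rw [PySem.Dict.keys_foldl_modify, PySem.Dict.keys_counter, update_ofList]
  have hkeysB : (List.foldl (fun d item => d.insert item (d.getD item 0 + 1))
      (PySem.Dict.mk inventory) items).keys
      = PySem.Set.update (PySem.Dict.mk inventory).keys items :=
    PySem.Dict.keys_foldl_insert items (fun d item => d.getD item 0 + 1) _
  have hnodup : (PySem.Set.update (PySem.Dict.mk inventory).keys items).Nodup :=
    PySem.Set.nodup_update _ _ hK
  -- values agree at every key
  have hval : ∀ v,
      (List.foldl (fun d key => d.modify key 0 (· + (PySem.Dict.counter items).getD key 0))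
        (PySem.Dict.mk inventory) (PySem.Dict.counter items).keys).getD v 0
      = (List.foldl (fun d item => d.insert item (d.getD item 0 + 1))
        (PySem.Dict.mk inventory) items).getD v 0 := by
    intro v
    rw [getD_merge_fold, PySem.Dict.getD_foldl_insert_add_one, PySem.Dict.getD_counter,
      PySem.Dict.keys_counter]
    by_cases hv : v ∈ items
    · have h1 : (PySem.Set.ofList items).count v = 1 :=
        List.count_eq_one_of_mem (PySem.Set.nodup_ofList items) ((PySem.Set.mem_ofList items v).2 hv)
      rw [h1]; push_cast; ring
    · have h0 : (PySem.Set.ofList items).count v = 0 :=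
        List.count_eq_zero.2 (fun h => hv ((PySem.Set.mem_ofList items v).1 h))
      have h0' : items.count v = 0 := List.count_eq_zero.2 hv
      rw [h0, h0']; ring
  rw [PySem.Dict.items_eq_map_keys _ (by rw [hkeysA]; exact hnodup) 0,
    PySem.Dict.items_eq_map_keys _ (by rw [hkeysB]; exact hnodup) 0, hkeysA, hkeysB]
  exact List.map_congr_left (fun k _ => by rw [hval k])
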